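-- pv_equiv track=rewrite | github.com/Nikikapralov/Python | Python/Python Fundamentals/3-Lists Basics/More Exercises/04-Battle_Ships.py | destroy_ships
-- ===== SOURCE A (Python) =====
-- def destroy_ships(board, commands, rows, cols):
--     destroyed = 0
--     for command in commands:
--         row = command[0]
--         col = command[1]
--         if 0 <= row < rows and 0 <= col < cols:
--             ship = board[row][col]
--             if ship > 0:
--                 board[row][col] -= 1
--                 if board[row][col] == 0:
--                     destroyed += 1
--     return destroyed
-- ===== SOURCE B (Python) =====
-- def destroy_ships(board, commands, rows, cols):
--     # Tally hits per in-bounds cell first, then judge each distinct cell once.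
--     hits = {}
--     for command in commands:
--         row, col = command[0], command[1]
--         if 0 <= row < rows and 0 <= col < cols:
--             hits[(row, col)] = hits.get((row, col), 0) + 1
--     destroyed = 0
--     for (row, col), h in hits.items():
--         initial = board[row][col]
--         if initial > 0:
--             board[row][col] = max(0, initial - h)
--             if h >= initial:
--                 destroyed += 1
--     return destroyed
-- ===== Notes on version B (the rewrite author's own statement) =====
-- stated objective: alternative
-- what changed: B replaces A's cell-by-cell mutating replay of every command with a single pass that counts hits per distinct in-bounds cell in a dict and then decides each cell once by comparing its hit count with its initial value (destroyed iff initial>0 and hits>=initial).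
import Mathlib
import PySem

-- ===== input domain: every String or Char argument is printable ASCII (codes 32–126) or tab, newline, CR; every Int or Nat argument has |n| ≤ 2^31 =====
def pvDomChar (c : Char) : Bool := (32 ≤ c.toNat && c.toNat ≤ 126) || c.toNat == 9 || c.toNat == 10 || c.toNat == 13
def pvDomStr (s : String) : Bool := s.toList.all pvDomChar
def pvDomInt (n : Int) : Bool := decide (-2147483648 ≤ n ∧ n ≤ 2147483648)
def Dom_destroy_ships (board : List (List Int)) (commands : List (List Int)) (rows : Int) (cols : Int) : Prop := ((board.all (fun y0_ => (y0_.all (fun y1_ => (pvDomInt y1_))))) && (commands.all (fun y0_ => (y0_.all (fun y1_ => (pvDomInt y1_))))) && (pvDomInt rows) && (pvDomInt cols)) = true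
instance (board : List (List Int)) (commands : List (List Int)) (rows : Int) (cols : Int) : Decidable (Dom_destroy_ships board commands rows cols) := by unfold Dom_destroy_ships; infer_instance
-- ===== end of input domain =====

-- B tallies hits per distinct in-bounds cell in a dict, then judges each cell once
-- (destroyed iff initial > 0 and hits ≥ initial), instead of A's mutating replay of
-- every command.  Both Pythons mutate `board` identically; equivalence is about the
-- return value.

-- ===== PORT A =====
def destroy_ships (board : List (List Int)) (commands : List (List Int)) (rows : Int) (cols : Int) : Int :=
  (commands.foldl (fun (st : List (List Int) × Int) command =>
    match PySem.List.pyGet? command 0, PySem.List.pyGet? command 1 with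
    | some row, some col =>
      if 0 ≤ row ∧ row < rows ∧ 0 ≤ col ∧ col < cols then
        match PySem.List.pyGet? st.1 row with
        | some rowL =>
          match PySem.List.pyGet? rowL col with
          | some ship =>
            if ship > 0 then
              -- board[row][col] -= 1  (row, col are nonnegative and in range here)
              let board' := st.1.set row.toNat (rowL.set col.toNat (ship - 1))
              -- if board[row][col] == 0: destroyed += 1
              match PySem.List.pyGet? board' row with
              | some rowL' =>
                match PySem.List.pyGet? rowL' col with
                | some ship' => if ship' = 0 then (board', st.2 + 1) else (board', st.2)
                | none => (board', st.2)
              | none => (board', st.2)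
            else st
          | none => st
        | none => st
      else st
    | _, _ => st) (board, (0 : Int))).2

-- ===== PORT B =====
def destroy_ships_alt (board : List (List Int)) (commands : List (List Int)) (rows : Int) (cols : Int) : Int :=
  let hits : PySem.Dict (Int × Int) Int := commands.foldl (fun d command =>
    match PySem.List.pyGet? command 0, PySem.List.pyGet? command 1 with
    | none, _ => d
    | _, none => d
    | some row, some col =>
      if 0 ≤ row ∧ row < rows ∧ 0 ≤ col ∧ col < cols then
        d.insert (row, col) (d.getD (row, col) 0 + 1)
      else d) PySem.Dict.empty
  hits.items.foldl (fun destroyed kv =>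
    match PySem.List.pyGet? board kv.1.1 with
    | none => destroyed
    | some rowL =>
      match PySem.List.pyGet? rowL kv.1.2 with
      | none => destroyed
      | some initial =>
        if initial > 0 then (if kv.2 ≥ initial then destroyed + 1 else destroyed) else destroyed) 0

-- ===== PRECONDITION & SPEC =====
-- Pre_ excludes exactly the inputs on which Python A raises: a command with fewer
-- than two entries (IndexError on command[0]/command[1]) or an in-bounds command
-- whose cell lies outside the actual board shape (IndexError on board[row][col]).
def Pre_destroy_ships (board : List (List Int)) (commands : List (List Int)) (rows : Int) (cols : Int) : Prop :=
  ∀ command ∈ commands, 2 ≤ command.length ∧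
    ((0 ≤ command.getD 0 0 ∧ command.getD 0 0 < rows ∧ 0 ≤ command.getD 1 0 ∧ command.getD 1 0 < cols) →
      ((command.getD 0 0).toNat < board.length ∧
       (command.getD 1 0).toNat < (board.getD (command.getD 0 0).toNat []).length))
instance (board : List (List Int)) (commands : List (List Int)) (rows : Int) (cols : Int) : Decidable (Pre_destroy_ships board commands rows cols) := by unfold Pre_destroy_ships; infer_instance

def pvWitness_destroy_ships : List (List Int) × List (List Int) × Int × Int :=
  ([[2, 1], [0, 3]], [[0, 0], [0, 0], [1, 1]], 2, 2)

def Spec_destroy_ships (board : List (List Int)) (commands : List (List Int)) (rows : Int) (cols : Int) (out : Int) : Prop := out = destroy_ships_alt board commands rows cols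
instance (board : List (List Int)) (commands : List (List Int)) (rows : Int) (cols : Int) (out : Int) : Decidable (Spec_destroy_ships board commands rows cols out) := by unfold Spec_destroy_ships; infer_instance

-- ===== CLAIM (what is proved, stated in full; the proofs are below) =====
def Claim_equal_destroy_ships : Prop := ∀ (board : List (List Int)) (commands : List (List Int)) (rows : Int) (cols : Int), Dom_destroy_ships board commands rows cols → Pre_destroy_ships board commands rows cols → Spec_destroy_ships board commands rows cols (destroy_ships board commands rows cols)

-- ===== LEMMAS AND PROOFS =====

/-- The in-bounds cell addressed by a command, if any. -/
def pvToCell (rows cols : Int) (cmd : List Int) : Option (Int × Int) :=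
  match PySem.List.pyGet? cmd 0, PySem.List.pyGet? cmd 1 with
  | some r, some c => if 0 ≤ r ∧ r < rows ∧ 0 ≤ c ∧ c < cols then some (r, c) else none
  | _, _ => none

def pvCells (rows cols : Int) (l : List (List Int)) : List (Int × Int) :=
  l.filterMap (pvToCell rows cols)

/-- What one distinct cell hit `h` times contributes to the destroyed count. -/
def pvContrib (b : List (List Int)) (k : Int × Int) (h : Int) : Int :=
  match PySem.List.pyGet? b k.1 with
  | some rowL =>
    match PySem.List.pyGet? rowL k.2 with
    | some v => if 0 < v ∧ v ≤ h then 1 else 0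
    | none => 0
  | none => 0

def pvSpecSum (b : List (List Int)) (rows cols : Int) (l : List (List Int)) : Int :=
  ∑ k ∈ (pvCells rows cols l).toFinset, pvContrib b k ((pvCells rows cols l).count k)

/-- Named copy of port A's loop body. -/
def pvStepA (rows cols : Int) (st : List (List Int) × Int) (command : List Int) : List (List Int) × Int :=
  match PySem.List.pyGet? command 0, PySem.List.pyGet? command 1 with
  | some row, some col =>
    if 0 ≤ row ∧ row < rows ∧ 0 ≤ col ∧ col < cols then
      match PySem.List.pyGet? st.1 row with
      | some rowL =>
        match PySem.List.pyGet? rowL col with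
        | some ship =>
          if ship > 0 then
            let board' := st.1.set row.toNat (rowL.set col.toNat (ship - 1))
            match PySem.List.pyGet? board' row with
            | some rowL' =>
              match PySem.List.pyGet? rowL' col with
              | some ship' => if ship' = 0 then (board', st.2 + 1) else (board', st.2)
              | none => (board', st.2)
            | none => (board', st.2)
          else st
        | none => st
      | none => st
    else st
  | _, _ => st

theorem destroy_ships_eq_fold (board commands : List (List Int)) (rows cols : Int) :
    destroy_ships board commands rows cols = (commands.foldl (pvStepA rows cols) (board, 0)).2 := rfl

theorem pvCells_cons_none {rows cols : Int} {cmd : List Int} (t : List (List Int))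
    (h : pvToCell rows cols cmd = none) :
    pvCells rows cols (cmd :: t) = pvCells rows cols t := by
  simp [pvCells, h]

theorem pvCells_cons_some {rows cols : Int} {cmd : List Int} {k : Int × Int} (t : List (List Int))
    (h : pvToCell rows cols cmd = some k) :
    pvCells rows cols (cmd :: t) = k :: pvCells rows cols t := by
  simp [pvCells, h]

theorem pvCells_nonneg {rows cols : Int} {l : List (List Int)} {k : Int × Int}
    (h : k ∈ pvCells rows cols l) : 0 ≤ k.1 ∧ 0 ≤ k.2 := by
  simp only [pvCells, List.mem_filterMap] at h
  obtain ⟨cmd, -, hc⟩ := h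
  unfold pvToCell at hc
  rcases h0 : PySem.List.pyGet? cmd 0 with _ | r <;> rw [h0] at hc <;>
    rcases h1 : PySem.List.pyGet? cmd 1 with _ | c <;> rw [h1] at hc <;>
    simp only [reduceCtorEq] at hc
  split_ifs at hc with hif
  cases hc; exact ⟨hif.1, hif.2.2.1⟩

/-- One step of the sum: peeling one command addressing cell `k`. -/
theorem pvSpecSum_cons {rows cols : Int} {cmd : List Int} {k : Int × Int}
    (t : List (List Int)) (b b' : List (List Int)) (δ : Int)
    (hc : pvToCell rows cols cmd = some k)
    (hoth : ∀ k' : Int × Int, 0 ≤ k'.1 → 0 ≤ k'.2 → k' ≠ k → ∀ h : Int, pvContrib b' k' h = pvContrib b k' h)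
    (hkey : ∀ h : Int, 0 ≤ h → pvContrib b k (h + 1) = δ + pvContrib b' k h)
    (h0 : pvContrib b' k 0 = 0) :
    pvSpecSum b rows cols (cmd :: t) = δ + pvSpecSum b' rows cols t := by
  have hcl : pvCells rows cols (cmd :: t) = k :: pvCells rows cols t := pvCells_cons_some t hc
  unfold pvSpecSum
  rw [hcl]
  by_cases hk : k ∈ pvCells rows cols t
  · have hT : (k :: pvCells rows cols t).toFinset = (pvCells rows cols t).toFinset := by
      simp [List.toFinset_cons, Finset.insert_eq_self.mpr (List.mem_toFinset.mpr hk)]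
    rw [hT,
      ← Finset.add_sum_erase _ (fun x => pvContrib b x ((k :: pvCells rows cols t).count x))
        (List.mem_toFinset.mpr hk),
      ← Finset.add_sum_erase _ (fun x => pvContrib b' x ((pvCells rows cols t).count x))
        (List.mem_toFinset.mpr hk)]
    have h1 : pvContrib b k (((k :: pvCells rows cols t).count k : Nat))
        = δ + pvContrib b' k (((pvCells rows cols t).count k : Nat)) := by
      rw [List.count_cons_self]
      push_cast
      exact hkey _ (by positivity)
    have h2 : ∀ x ∈ (pvCells rows cols t).toFinset.erase k,
        pvContrib b x (((k :: pvCells rows cols t).count x : Nat))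
          = pvContrib b' x (((pvCells rows cols t).count x : Nat)) := by
      intro x hx
      have hxk : x ≠ k := Finset.ne_of_mem_erase hx
      have hnn := pvCells_nonneg (List.mem_toFinset.mp (Finset.mem_of_mem_erase hx))
      rw [List.count_cons_of_ne (Ne.symm hxk), hoth x hnn.1 hnn.2 hxk]
    rw [Finset.sum_congr rfl h2, h1]
    ring
  · have hk0 : (pvCells rows cols t).count k = 0 := List.count_eq_zero.mpr hk
    rw [List.toFinset_cons, Finset.sum_insert (by simp [hk])]
    have h1 : pvContrib b k (((k :: pvCells rows cols t).count k : Nat)) = δ := by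
      rw [List.count_cons_self, hk0]
      have := hkey 0 le_rfl
      rw [h0] at this
      simpa using this
    have h2 : ∀ x ∈ (pvCells rows cols t).toFinset,
        pvContrib b x (((k :: pvCells rows cols t).count x : Nat))
          = pvContrib b' x (((pvCells rows cols t).count x : Nat)) := by
      intro x hx
      have hxk : x ≠ k := by rintro rfl; exact hk (List.mem_toFinset.mp hx)
      have hnn := pvCells_nonneg (List.mem_toFinset.mp hx)
      rw [List.count_cons_of_ne (Ne.symm hxk), hoth x hnn.1 hnn.2 hxk]
    rw [Finset.sum_congr rfl h2, h1]

theorem pvSpecSum_cons_none {rows cols : Int} {cmd : List Int} (t : List (List Int))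
    (b : List (List Int)) (h : pvToCell rows cols cmd = none) :
    pvSpecSum b rows cols (cmd :: t) = pvSpecSum b rows cols t := by
  simp [pvSpecSum, pvCells_cons_none t h]

theorem pvToCell_some_elim {rows cols : Int} {cmd : List Int} {k : Int × Int}
    (h : pvToCell rows cols cmd = some k) :
    PySem.List.pyGet? cmd 0 = some k.1 ∧ PySem.List.pyGet? cmd 1 = some k.2 ∧
      0 ≤ k.1 ∧ k.1 < rows ∧ 0 ≤ k.2 ∧ k.2 < cols := by
  unfold pvToCell at h
  rcases h0 : PySem.List.pyGet? cmd 0 with _ | r <;> rw [h0] at h <;>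
    rcases h1 : PySem.List.pyGet? cmd 1 with _ | c <;> rw [h1] at h <;>
    simp only [reduceCtorEq] at h
  replace h : (if 0 ≤ r ∧ r < rows ∧ 0 ≤ c ∧ c < cols then some (r, c) else (none : Option (Int × Int))) = some k := h
  split_ifs at h with hif
  cases h
  first
    | exact ⟨h0, h1, hif.1, hif.2.1, hif.2.2.1, hif.2.2.2⟩
    | exact ⟨rfl, rfl, hif.1, hif.2.1, hif.2.2.1, hif.2.2.2⟩

theorem pvStepA_none {rows cols : Int} {cmd : List Int} (st : List (List Int) × Int)
    (h : pvToCell rows cols cmd = none) : pvStepA rows cols st cmd = st := by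
  unfold pvStepA
  unfold pvToCell at h
  rcases h0 : PySem.List.pyGet? cmd 0 with _ | r <;> rw [h0] at h
  rcases h1 : PySem.List.pyGet? cmd 1 with _ | c <;> rw [h1] at h
  replace h : (if 0 ≤ r ∧ r < rows ∧ 0 ≤ c ∧ c < cols then some (r, c) else (none : Option (Int × Int))) = none := h
  split_ifs at h with hif
  change (if 0 ≤ r ∧ r < rows ∧ 0 ≤ c ∧ c < cols then _ else st) = st
  rw [if_neg hif]

theorem pvRunA_eq (rows cols : Int) : ∀ (l : List (List Int)) (b : List (List Int)) (d : Int),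
    (l.foldl (pvStepA rows cols) (b, d)).2 = d + pvSpecSum b rows cols l := by
  intro l
  induction l with
  | nil => intro b d; simp [pvSpecSum, pvCells]
  | cons cmd t ih =>
    intro b d
    rw [List.foldl_cons]
    rcases hc : pvToCell rows cols cmd with _ | k
    · rw [pvStepA_none _ hc, ih, pvSpecSum_cons_none t b hc]
    obtain ⟨h0, h1, hb1, hb2, hb3, hb4⟩ := pvToCell_some_elim hc
    have hcontrib_id : ∀ b' : List (List Int), b' = b →
        (∀ k' : Int × Int, 0 ≤ k'.1 → 0 ≤ k'.2 → k' ≠ k → ∀ h : Int,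
          pvContrib b' k' h = pvContrib b k' h) := by rintro b' rfl k' _ _ _ h; rfl
    rcases hbr : PySem.List.pyGet? b k.1 with _ | rowL
    · have hstep : pvStepA rows cols (b, d) cmd = (b, d) := by
        unfold pvStepA
        simp [h0, h1, hb1, hb2, hb3, hb4, hbr]
      rw [hstep, ih,
        pvSpecSum_cons t b b 0 hc (hcontrib_id b rfl)
          (fun h _ => by unfold pvContrib; simp [hbr])
          (by unfold pvContrib; simp [hbr]), zero_add]
    rcases hbc : PySem.List.pyGet? rowL k.2 with _ | v
    · have hstep : pvStepA rows cols (b, d) cmd = (b, d) := by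
        unfold pvStepA
        simp [h0, h1, hb1, hb2, hb3, hb4, hbr, hbc]
      rw [hstep, ih,
        pvSpecSum_cons t b b 0 hc (hcontrib_id b rfl)
          (fun h _ => by unfold pvContrib; simp [hbr, hbc])
          (by unfold pvContrib; simp [hbr, hbc]), zero_add]
    by_cases hv : v > 0
    · -- the hit decrements the cell
      have hbr' := hbr
      rw [PySem.List.pyGet?_of_nonneg b hb1] at hbr'
      obtain ⟨hltr, -⟩ := List.getElem?_eq_some_iff.mp hbr'
      have hbc' := hbc
      rw [PySem.List.pyGet?_of_nonneg rowL hb3] at hbc'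
      obtain ⟨hltc, -⟩ := List.getElem?_eq_some_iff.mp hbc'
      have hc2 : PySem.List.pyGet? (rowL.set k.2.toNat (v - 1)) k.2 = some (v - 1) := by
        rw [PySem.List.pyGet?_of_nonneg _ hb3]
        exact List.getElem?_set_self hltc
      have hr2 : PySem.List.pyGet? (b.set k.1.toNat (rowL.set k.2.toNat (v - 1))) k.1
          = some (rowL.set k.2.toNat (v - 1)) := by
        rw [PySem.List.pyGet?_of_nonneg _ hb1]
        exact List.getElem?_set_self (by simpa using hltr)
      have hstep : pvStepA rows cols (b, d) cmd
          = (b.set k.1.toNat (rowL.set k.2.toNat (v - 1)), if v - 1 = 0 then d + 1 else d) := by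
        unfold pvStepA
        simp only [h0, h1, hbr, hbc, hr2, hc2]
        rw [if_pos ⟨hb1, hb2, hb3, hb4⟩, if_pos hv]
        split_ifs <;> rfl
      have hoth : ∀ k' : Int × Int, 0 ≤ k'.1 → 0 ≤ k'.2 → k' ≠ k → ∀ h : Int,
          pvContrib (b.set k.1.toNat (rowL.set k.2.toNat (v - 1))) k' h = pvContrib b k' h := by
        intro k' hn1 hn2 hne h
        unfold pvContrib
        by_cases hrr : k'.1.toNat = k.1.toNat
        · have heq : k'.1 = k.1 := by omega
          have hcc : k'.2 ≠ k.2 := by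
            intro hceq
            apply hne
            cases k'; cases k
            simp_all
          simp only [PySem.List.pyGet?_of_nonneg _ hn1, hrr, hbr']
          rw [List.getElem?_set_self (by simpa using hltr)]
          simp only [PySem.List.pyGet?_of_nonneg _ hn2,
            List.getElem?_set_ne (show k.2.toNat ≠ k'.2.toNat by omega)]
          try rfl
        · simp only [PySem.List.pyGet?_of_nonneg _ hn1,
            List.getElem?_set_ne (Ne.symm hrr)]
      have hkey : ∀ h : Int, 0 ≤ h →
          pvContrib b k (h + 1)
            = (if v - 1 = 0 then (1 : Int) else 0)
              + pvContrib (b.set k.1.toNat (rowL.set k.2.toNat (v - 1))) k h := by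
        intro h hh
        unfold pvContrib
        simp only [hbr, hbc, hr2, hc2]
        split_ifs <;> omega
      have hz : pvContrib (b.set k.1.toNat (rowL.set k.2.toNat (v - 1))) k 0 = 0 := by
        unfold pvContrib
        simp only [hr2, hc2]
        split_ifs <;> omega
      rw [hstep, ih, pvSpecSum_cons t b _ (if v - 1 = 0 then 1 else 0) hc hoth hkey hz]
      split_ifs <;> ring
    · have hstep : pvStepA rows cols (b, d) cmd = (b, d) := by
        unfold pvStepA
        simp [h0, h1, hb1, hb2, hb3, hb4, hbr, hbc, hv]
      rw [hstep, ih,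
        pvSpecSum_cons t b b 0 hc (hcontrib_id b rfl)
          (fun h hh => by unfold pvContrib; simp only [hbr, hbc]; split_ifs <;> omega)
          (by unfold pvContrib; simp only [hbr, hbc]; split_ifs <;> omega), zero_add]

/-- Named copy of port B's first loop body. -/
def pvStepB (rows cols : Int) (d : PySem.Dict (Int × Int) Int) (command : List Int) : PySem.Dict (Int × Int) Int :=
  match PySem.List.pyGet? command 0, PySem.List.pyGet? command 1 with
  | none, _ => d
  | _, none => d
  | some row, some col =>
    if 0 ≤ row ∧ row < rows ∧ 0 ≤ col ∧ col < cols then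
      d.insert (row, col) (d.getD (row, col) 0 + 1)
    else d

theorem pvStepB_none {rows cols : Int} {cmd : List Int} (d : PySem.Dict (Int × Int) Int)
    (h : pvToCell rows cols cmd = none) : pvStepB rows cols d cmd = d := by
  unfold pvStepB
  unfold pvToCell at h
  rcases h0 : PySem.List.pyGet? cmd 0 with _ | r <;> rw [h0] at h
  rcases h1 : PySem.List.pyGet? cmd 1 with _ | c <;> rw [h1] at h
  show (if 0 ≤ r ∧ r < rows ∧ 0 ≤ c ∧ c < cols then _ else d) = d
  replace h : (if 0 ≤ r ∧ r < rows ∧ 0 ≤ c ∧ c < cols then some (r, c) else (none : Option (Int × Int))) = none := h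
  split_ifs at h ⊢ with hif
  rfl

theorem pvStepB_some {rows cols : Int} {cmd : List Int} {k : Int × Int} (d : PySem.Dict (Int × Int) Int)
    (h : pvToCell rows cols cmd = some k) : pvStepB rows cols d cmd = d.insert k (d.getD k 0 + 1) := by
  unfold pvStepB
  unfold pvToCell at h
  rcases h0 : PySem.List.pyGet? cmd 0 with _ | r <;> rw [h0] at h <;>
    rcases h1 : PySem.List.pyGet? cmd 1 with _ | c <;> rw [h1] at h <;>
    simp only [reduceCtorEq] at h
  show (if 0 ≤ r ∧ r < rows ∧ 0 ≤ c ∧ c < cols then _ else d) = d.insert k (d.getD k 0 + 1)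
  split_ifs at h ⊢ with hif
  cases h; rfl

theorem pvHits_eq (rows cols : Int) : ∀ (l : List (List Int)) (d : PySem.Dict (Int × Int) Int),
    l.foldl (pvStepB rows cols) d
      = (pvCells rows cols l).foldl (fun d x => d.insert x (d.getD x 0 + 1)) d := by
  intro l
  induction l with
  | nil => intro d; rfl
  | cons cmd t ih =>
    intro d
    rw [List.foldl_cons]
    rcases hc : pvToCell rows cols cmd with _ | k
    · rw [pvStepB_none d hc, ih, pvCells_cons_none t hc]
    · rw [pvStepB_some d hc, ih, pvCells_cons_some t hc, List.foldl_cons]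

theorem pvAlt_eq_specSum (board commands : List (List Int)) (rows cols : Int) :
    destroy_ships_alt board commands rows cols = pvSpecSum board rows cols commands := by
  show ((commands.foldl (pvStepB rows cols) PySem.Dict.empty).items.foldl _ 0 : Int) = _
  rw [pvHits_eq, PySem.Dict.foldl_insert_getD_add_one_eq_counter, PySem.Dict.items_counter]
  have hbody : (fun (destroyed : Int) (kv : (Int × Int) × Int) =>
      match PySem.List.pyGet? board kv.1.1 with
      | none => destroyed
      | some rowL =>
        match PySem.List.pyGet? rowL kv.1.2 with
        | none => destroyed
        | some initial =>
          if initial > 0 then (if kv.2 ≥ initial then destroyed + 1 else destroyed) else destroyed)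
      = fun (acc : Int) (kv : (Int × Int) × Int) => acc + pvContrib board kv.1 kv.2 := by
    funext acc kv
    unfold pvContrib
    rcases PySem.List.pyGet? board kv.1.1 with _ | rowL
    all_goals try (show acc = acc + (0 : Int); omega)
    all_goals (
      show (match PySem.List.pyGet? rowL kv.1.2 with
            | none => acc
            | some initial => if initial > 0 then (if kv.2 ≥ initial then acc + 1 else acc) else acc)
          = acc + (match PySem.List.pyGet? rowL kv.1.2 with
            | some v => if 0 < v ∧ v ≤ kv.2 then 1 else 0
            | none => 0))
    rcases PySem.List.pyGet? rowL kv.1.2 with _ | v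
    all_goals try (show acc = acc + (0 : Int); omega)
    all_goals (
      show (if v > 0 then (if kv.2 ≥ v then acc + 1 else acc) else acc)
          = acc + (if 0 < v ∧ v ≤ kv.2 then 1 else 0)
      split_ifs <;> omega)
  rw [hbody, PySem.List.foldl_add, List.map_map, zero_add]
  unfold pvSpecSum
  rw [← PySem.List.dedup_eq_ofList,
    ← List.sum_toFinset _ (PySem.List.nodup_dedup (pvCells rows cols commands))]
  have hT : (PySem.List.dedup (pvCells rows cols commands)).toFinset
      = (pvCells rows cols commands).toFinset := by
    ext x
    simp
  rw [hT]
  rfl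

-- ===== VERDICT (by name: the statement is the Claim_ definition above) =====
theorem destroy_ships_spec : Claim_equal_destroy_ships := by
  intro board commands rows cols _ _
  unfold Spec_destroy_ships
  rw [destroy_ships_eq_fold, pvRunA_eq, pvAlt_eq_specSum, zero_add]
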